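-- pv_equiv track=rewrite | github.com/manwar/perlweeklychallenge-club | challenge-257/lubos-kolouch/python/ch-2.py | is_reduced_row_echelon
-- ===== SOURCE A (Python) =====
-- def is_reduced_row_echelon(matrix: list[list[int]]) -> int:
--     last_leading = -1
--     zero_row_encountered = False
--
--     for row in matrix:
--         if all(x == 0 for x in row):
--             zero_row_encountered = True
--             continue
--
--         if zero_row_encountered:
--             return 0  # Non-zero row after a zero row
--
--         try:
--             leading = next(i for i, x in enumerate(row) if x != 0)
--         except StopIteration:
--             continue  # Should not happen as zero rows are handled above
--
--         # Check for leading 1 and correct position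
--         if row[leading] != 1 or leading <= last_leading:
--             return 0
--
--         # Check other elements in leading 1's column
--         if any(
--             matrix[i][leading] != 0
--             for i in range(len(matrix))
--             if i != matrix.index(row)
--         ):
--             return 0
--
--         last_leading = leading
--
--     return 1
-- ===== SOURCE B (Python) =====
-- def is_reduced_row_echelon(matrix: list[list[int]]) -> int:
--     # One pass: precompute nonzero counts per column, then check each row once.
--     counts = {}
--     for row in matrix:
--         for j, x in enumerate(row):
--             if x != 0:
--                 counts[j] = counts.get(j, 0) + 1
--     last = -1
--     seen_zero = False
--     for row in matrix:
--         lead = next((j for j, x in enumerate(row) if x != 0), None)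
--         if lead is None:
--             seen_zero = True
--             continue
--         if seen_zero or row[lead] != 1 or lead <= last or counts[lead] != 1:
--             return 0
--         last = lead
--     return 1
-- ===== Notes on version B (the rewrite author's own statement) =====
-- stated objective: alternative
-- what changed: A rescans the whole column (plus a matrix.index scan) for every row's leading 1; B precomputes a per-column nonzero-count table in one pass and then checks each row once against it (better worst case, but A's early exits make the two comparable on typical random inputs).
-- outside the precondition, e.g. on is_reduced_row_echelon([[2], [0, 1]]): A returns 0, B returns 0
import Mathlib
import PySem

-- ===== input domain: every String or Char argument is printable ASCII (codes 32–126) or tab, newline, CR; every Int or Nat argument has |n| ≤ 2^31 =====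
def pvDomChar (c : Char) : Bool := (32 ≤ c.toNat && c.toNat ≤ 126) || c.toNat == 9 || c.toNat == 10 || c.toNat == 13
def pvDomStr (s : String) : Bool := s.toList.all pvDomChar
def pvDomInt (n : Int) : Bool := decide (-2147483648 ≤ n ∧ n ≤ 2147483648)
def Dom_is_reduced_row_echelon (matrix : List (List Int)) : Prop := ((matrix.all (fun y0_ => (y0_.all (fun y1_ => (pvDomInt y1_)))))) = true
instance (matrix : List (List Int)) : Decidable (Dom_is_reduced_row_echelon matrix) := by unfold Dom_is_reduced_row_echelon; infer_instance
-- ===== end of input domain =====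

-- B replaces A's per-row full-column rescans (and matrix.index scan) by one precomputed
-- table of nonzero counts per column, checked once per row.

-- ===== PORT A =====
-- next(i for i, x in enumerate(row) if x != 0), as an Option (none = StopIteration)
def pvALeading : List Int → Option Nat
  | [] => none
  | x :: xs => if x ≠ 0 then some 0 else (pvALeading xs).map (· + 1)

-- any(matrix[i][leading] != 0 for i in range(len(matrix)) if i != idx);
-- none = IndexError raised by matrix[i][leading] (excluded by Pre_)
def pvAColAny (matrix : List (List Int)) (idx lead : Nat) : List Nat → Option Bool
  | [] => some false
  | i :: rest =>
    if i = idx then pvAColAny matrix idx lead rest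
    else
      match PySem.List.pyGet? matrix (i : Int) with
      | none => none
      | some r =>
        match PySem.List.pyGet? r (lead : Int) with
        | none => none
        | some v => if v ≠ 0 then some true else pvAColAny matrix idx lead rest

-- the for-loop over rows, state (last_leading, zero_row_encountered)
def pvALoop (matrix : List (List Int)) : List (List Int) → Int → Bool → Int
  | [], _, _ => 1
  | row :: rest, lastLeading, zeroRow =>
    if row.all (fun x => x == 0) then pvALoop matrix rest lastLeading true
    else if zeroRow then 0
    else
      match pvALeading row with
      | none => pvALoop matrix rest lastLeading zeroRow   -- "should not happen"
      | some leading =>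
        if PySem.List.pyGetD row (leading : Int) 0 ≠ 1 ∨ (leading : Int) ≤ lastLeading then 0
        else
          match pvAColAny matrix ((PySem.List.index? matrix row).getD 0) leading
                  (List.range matrix.length) with
          | none => 0          -- IndexError path, outside Pre_
          | some true => 0
          | some false => pvALoop matrix rest (leading : Int) zeroRow

def is_reduced_row_echelon (matrix : List (List Int)) : Int :=
  pvALoop matrix matrix (-1) false

-- ===== PORT B =====
-- inner loop of the counts pass: for j, x in enumerate(row): if x != 0: counts[j] = counts.get(j, 0) + 1
def pvBCountRow : PySem.Dict Nat Int → Nat → List Int → PySem.Dict Nat Int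
  | d, _, [] => d
  | d, j, x :: xs =>
    pvBCountRow (if x ≠ 0 then d.insert j (d.getD j 0 + 1) else d) (j + 1) xs

def pvBCounts (matrix : List (List Int)) : PySem.Dict Nat Int :=
  matrix.foldl (fun d row => pvBCountRow d 0 row) PySem.Dict.empty

-- the single checking pass; state (last, seen_zero)
def pvBLoop (counts : PySem.Dict Nat Int) : List (List Int) → Int → Bool → Int
  | [], _, _ => 1
  | row :: rest, last, seenZero =>
    match row.findIdx? (fun x => x != 0) with    -- next((j for j, x in enumerate(row) if x != 0), None)
    | none => pvBLoop counts rest last true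
    | some lead =>
      if seenZero || (PySem.List.pyGetD row (lead : Int) 0 != 1)
          || decide ((lead : Int) ≤ last) || (counts.getD lead 0 != 1)
      then 0
      else pvBLoop counts rest (lead : Int) seenZero

def is_reduced_row_echelon_alt (matrix : List (List Int)) : Int :=
  pvBLoop (pvBCounts matrix) matrix (-1) false

-- ===== PRECONDITION & SPEC =====
-- Pre_ excludes matrices in which some row has leading entry 1 in a column that reaches
-- past the end of another (shorter) row: on those A's column scan may raise IndexError.
def Pre_is_reduced_row_echelon (matrix : List (List Int)) : Prop :=
  ∀ r ∈ matrix, (∃ x ∈ r, x ≠ 0) → r.getD (r.findIdx (fun x => x != 0)) 0 = 1 →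
    ∀ s ∈ matrix, r.findIdx (fun x => x != 0) < s.length

instance (matrix : List (List Int)) : Decidable (Pre_is_reduced_row_echelon matrix) := by
  unfold Pre_is_reduced_row_echelon; infer_instance

def pvWitness_is_reduced_row_echelon : List (List Int) := [[1, 0], [0, 1]]

def Spec_is_reduced_row_echelon (matrix : List (List Int)) (out : Int) : Prop :=
  out = is_reduced_row_echelon_alt matrix
instance (matrix : List (List Int)) (out : Int) : Decidable (Spec_is_reduced_row_echelon matrix out) := by
  unfold Spec_is_reduced_row_echelon; infer_instance

-- ===== CLAIM (what is proved, stated in full; the proofs are below) =====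
def Claim_equal_is_reduced_row_echelon : Prop :=
  ∀ (matrix : List (List Int)), Dom_is_reduced_row_echelon matrix →
    Pre_is_reduced_row_echelon matrix →
    Spec_is_reduced_row_echelon matrix (is_reduced_row_echelon matrix)

-- ===== LEMMAS AND PROOFS =====

-- A's leading-index search is findIdx? of (x != 0)
theorem pvALeading_eq (row : List Int) : pvALeading row = row.findIdx? (fun x => x != 0) := by
  induction row with
  | nil => rfl
  | cons x xs ih =>
    by_cases hx : x = 0 <;> simp [pvALeading, List.findIdx?_cons, ih, hx]

-- the per-column nonzero predicate B's dict counts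
def pvNzAt (j : Nat) (r : List Int) : Bool := r.getD j 0 != 0

theorem pvBCountRow_getD (row : List Int) : ∀ (d : PySem.Dict Nat Int) (j k : Nat),
    (pvBCountRow d j row).getD k 0 =
      d.getD k 0 + (if j ≤ k ∧ pvNzAt (k - j) row then 1 else 0) := by
  induction row with
  | nil => intro d j k; simp [pvBCountRow, pvNzAt]
  | cons x xs ih =>
    intro d j k
    simp only [pvBCountRow, ih]
    by_cases hk : k = j
    · subst hk
      by_cases hx : x = 0 <;>
        simp [hx, pvNzAt, show ¬ (k + 1 ≤ k) by omega]
    · have hins : ∀ v : Int, (d.insert j v).getD k 0 = d.getD k 0 := by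
        intro v; simp [PySem.Dict.getD_insert, hk]
      by_cases hjk : j + 1 ≤ k
      · have hsub : k - j = (k - (j + 1)) + 1 := by omega
        by_cases hx : x = 0 <;>
          simp [hx, hins, hsub, pvNzAt, show j ≤ k by omega, hjk]
      · have hnle : ¬ j ≤ k := by omega
        by_cases hx : x = 0 <;> simp [hx, hins, hjk, hnle]

theorem pvBCounts_getD (matrix : List (List Int)) (k : Nat) :
    (pvBCounts matrix).getD k 0 = (matrix.countP (pvNzAt k) : Int) := by
  have key : ∀ (rows : List (List Int)) (d : PySem.Dict Nat Int),
      (rows.foldl (fun d row => pvBCountRow d 0 row) d).getD k 0 =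
        d.getD k 0 + (rows.countP (pvNzAt k) : Int) := by
    intro rows
    induction rows with
    | nil => intro d; simp
    | cons r rs ih =>
      intro d
      simp only [List.foldl_cons, ih, pvBCountRow_getD r d 0 k, List.countP_cons]
      by_cases h : pvNzAt k r <;> simp [h] <;> ring
  unfold pvBCounts
  rw [key]
  simp [PySem.Dict.getD, PySem.Dict.empty, PySem.Dict.get?]

-- countP over the rows equals countP over their indices
theorem pvCountP_range (matrix : List (List Int)) (p : List Int → Bool) :
    matrix.countP p = (List.range matrix.length).countP (fun i => p (matrix.getD i [])) := by
  induction matrix with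
  | nil => rfl
  | cons r rs ih =>
    rw [List.length_cons, List.range_succ_eq_map, List.countP_cons, List.countP_cons,
      List.countP_map]
    have hcomp : ((fun i => p ((r :: rs).getD i [])) ∘ Nat.succ) = fun i => p (rs.getD i []) := by
      funext i; simp
    rw [hcomp, ← ih]
    simp [List.getD]

-- A's column scan evaluates without IndexError and computes the obvious 'any'
theorem pvAColAny_eq (matrix : List (List Int)) (idx lead : Nat)
    (hlen : ∀ s ∈ matrix, lead < s.length) :
    ∀ l : List Nat, (∀ i ∈ l, i < matrix.length) →
      pvAColAny matrix idx lead l =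
        some (l.any (fun i => i ≠ idx && pvNzAt lead (matrix.getD i []))) := by
  intro l
  induction l with
  | nil => intro _; rfl
  | cons i rest ih =>
    intro hmem
    have hi : i < matrix.length := hmem i (by simp)
    have hrest : ∀ j ∈ rest, j < matrix.length := fun j hj => hmem j (by simp [hj])
    by_cases hidx : i = idx
    · simp [pvAColAny, hidx, ih hrest]
    · have h1 : PySem.List.pyGet? matrix (i : Int) = some matrix[i] := by
        simp [PySem.List.pyGet?_natCast, List.getElem?_eq_getElem hi]
      have hrow : lead < matrix[i].length := hlen _ (List.getElem_mem hi)
      have h2 : PySem.List.pyGet? matrix[i] (lead : Int) = some matrix[i][lead] := by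
        simp [PySem.List.pyGet?_natCast, List.getElem?_eq_getElem hrow]
      by_cases hv : matrix[i][lead] = 0
      · have hnz : pvNzAt lead (matrix.getD i []) = false := by
          simp [pvNzAt, List.getD, List.getElem?_eq_getElem hi, List.getElem?_eq_getElem hrow, hv]
        have hfi : (decide (i ≠ idx) && pvNzAt lead (matrix.getD i [])) = false := by
          rw [hnz]; simp
        simp only [pvAColAny, if_neg hidx, h1, h2]
        rw [if_neg (not_not_intro hv), ih hrest, List.any_cons, hfi, Bool.false_or]
      · have hnz : pvNzAt lead (matrix.getD i []) = true := by
          simp [pvNzAt, List.getD, List.getElem?_eq_getElem hi, List.getElem?_eq_getElem hrow, hv]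
        have hfi : (decide (i ≠ idx) && pvNzAt lead (matrix.getD i [])) = true := by
          rw [hnz]; simp [hidx]
        simp only [pvAColAny, if_neg hidx, h1, h2]
        rw [if_pos hv, List.any_cons, hfi, Bool.true_or]

-- splitting a countP at one distinguished index
theorem pvCountP_split (l : List Nat) (q : Nat → Bool) (idx : Nat) :
    l.countP q = l.countP (fun i => i = idx && q i) + l.countP (fun i => i ≠ idx && q i) := by
  induction l with
  | nil => rfl
  | cons i rest ih =>
    simp only [List.countP_cons, ih]
    by_cases hi : i = idx <;> by_cases hq : q i <;> simp [hi, hq] <;> omega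

theorem pvCount_one_iff (matrix : List (List Int)) (idx lead : Nat)
    (hidx : idx < matrix.length) (hq : pvNzAt lead (matrix.getD idx []) = true) :
    ((List.range matrix.length).any
        (fun i => i ≠ idx && pvNzAt lead (matrix.getD i [])) = false)
      ↔ matrix.countP (pvNzAt lead) = 1 := by
  rw [pvCountP_range matrix (pvNzAt lead)]
  set n := matrix.length with hn
  have hsplit := pvCountP_split (List.range n) (fun i => pvNzAt lead (matrix.getD i [])) idx
  have hq2 : pvNzAt lead (matrix[idx]?.getD []) = true := by simpa [List.getD] using hq
  have hone : (List.range n).countP (fun i => i = idx && pvNzAt lead (matrix.getD i [])) = 1 := by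
    have hfun : (fun i => decide (i = idx) && pvNzAt lead (matrix.getD i [])) =
        fun i => i == idx := by
      funext i
      by_cases h : i = idx
      · simp [h, List.getD, hq2]
      · simp [h]
    rw [hfun, ← List.count_eq_countP, List.count_range, if_pos hidx]
  constructor
  · intro hany
    have h0 : (List.range n).countP (fun i => i ≠ idx && pvNzAt lead (matrix.getD i [])) = 0 := by
      rw [List.countP_eq_zero]
      intro i hi
      have := List.any_eq_false.mp hany i hi
      simpa using this
    omega
  · intro hcnt
    have h0 : (List.range n).countP (fun i => i ≠ idx && pvNzAt lead (matrix.getD i [])) = 0 := by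
      omega
    rw [List.any_eq_false]
    intro i hi
    have := List.countP_eq_zero.mp h0 i hi
    simpa using this

-- a row with no nonzero entry is exactly an all-zero row
theorem pvFindIdx?_none_iff (row : List Int) :
    row.findIdx? (fun x => x != 0) = none ↔ row.all (fun x => x == 0) = true := by
  rw [List.findIdx?_eq_none_iff, List.all_eq_true]
  constructor <;> (intro h x hx; have := h x hx; simpa using this)

-- the main loop-by-loop equivalence
theorem pvLoop_eq (matrix : List (List Int)) (hpre : Pre_is_reduced_row_echelon matrix) :
    ∀ (rest : List (List Int)), (∀ r ∈ rest, r ∈ matrix) →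
      ∀ (last : Int) (zr : Bool),
        pvALoop matrix rest last zr = pvBLoop (pvBCounts matrix) rest last zr := by
  intro rest
  induction rest with
  | nil => intro _ last zr; rfl
  | cons row rs ih =>
    intro hmem last zr
    have hrow : row ∈ matrix := hmem row (by simp)
    have hrs : ∀ r ∈ rs, r ∈ matrix := fun r hr => hmem r (by simp [hr])
    by_cases hz : row.all (fun x => x == 0)
    · -- zero row: both continue with the flag set
      have hf : row.findIdx? (fun x => x != 0) = none := (pvFindIdx?_none_iff row).mpr hz
      simp [pvALoop, pvBLoop, hz, hf, ih hrs]
    · -- nonzero row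
      obtain ⟨lead, hf⟩ : ∃ k, row.findIdx? (fun x => x != 0) = some k := by
        rcases h : row.findIdx? (fun x => x != 0) with _ | k
        · exact absurd ((pvFindIdx?_none_iff row).mp h) hz
        · exact ⟨k, rfl⟩
      obtain ⟨hlt, hfi⟩ := List.findIdx?_eq_some_iff_findIdx_eq.mp hf
      have hleadnz : row[lead] ≠ 0 := by
        have := List.findIdx_getElem (w := hfi ▸ hlt) (xs := row) (p := fun x => x != 0)
        simpa [hfi] using this
      have hget : PySem.List.pyGetD row (lead : Int) 0 = row[lead] := by
        simp [PySem.List.pyGetD_natCast, List.getD, List.getElem?_eq_getElem hlt]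
      cases zr with
      | true => simp [pvALoop, pvBLoop, hz, hf]
      | false =>
        by_cases hcheck : row[lead] ≠ 1 ∨ (lead : Int) ≤ last
        · -- both return 0 on the leading-entry checks
          have hb : (PySem.List.pyGetD row (lead : Int) 0 != 1)
              || decide ((lead : Int) ≤ last) = true := by
            rcases hcheck with h | h <;> simp [hget, h]
          simp only [pvALoop, hz, Bool.false_eq_true, if_false, pvALeading_eq, hf]
          simp only [pvBLoop, hf]
          rw [if_pos (by simp [hget]; omega), if_pos]
          · rcases hcheck with h | h <;> simp [hget, h]
        · push_neg at hcheck
          obtain ⟨hone, hlast⟩ := hcheck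
          have hleadlen : ∀ s ∈ matrix, lead < s.length := by
            intro s hs
            have h1 : row.getD (row.findIdx (fun x => x != 0)) 0 = 1 := by
              simp [hfi, List.getD, List.getElem?_eq_getElem hlt, hone]
            have := hpre row hrow ⟨row[lead], List.getElem_mem hlt, hleadnz⟩ h1 s hs
            omega
          -- A's matrix.index(row) returns an index holding row
          obtain ⟨idx, hidx⟩ : ∃ k, PySem.List.index? matrix row = some k := by
            rcases h : PySem.List.index? matrix row with _ | k
            · rw [PySem.List.index?_eq_none_iff] at h; exact absurd hrow h
            · exact ⟨k, rfl⟩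
          obtain ⟨hik, hieq, -⟩ := PySem.List.getElem_of_index?_eq_some hidx
          have hqidx : pvNzAt lead (matrix.getD idx []) = true := by
            simp [pvNzAt, List.getD, List.getElem?_eq_getElem hik, hieq,
              List.getElem?_eq_getElem hlt, hone]
          have hcol := pvAColAny_eq matrix idx lead hleadlen (List.range matrix.length)
            (by intro i hi; simpa using hi)
          have hcnt := pvCount_one_iff matrix idx lead hik hqidx
          have hcd := pvBCounts_getD matrix lead
          simp only [pvALoop, hz, Bool.false_eq_true, if_false, pvALeading_eq, hf,
            hidx, Option.getD_some, hcol]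
          rw [if_neg (by simp [hget, hone]; omega)]
          simp only [pvBLoop, hf]
          rcases hany : (List.range matrix.length).any
              (fun i => i ≠ idx && pvNzAt lead (matrix.getD i [])) with _ | _
          · -- no other nonzero in the column: both recurse
            have h1 : matrix.countP (pvNzAt lead) = 1 := hcnt.mp hany
            rw [if_neg]
            · exact ih hrs (lead : Int) false
            · simp [hget, hone, hcd, h1, hlast]
          · -- another nonzero: both return 0
            have h1 : matrix.countP (pvNzAt lead) ≠ 1 := fun hc => by
              have := hcnt.mpr hc; rw [hany] at this; cases this
            rw [if_pos]
            simp [hget, hone, hcd]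
            exact Or.inr (by exact_mod_cast h1)

-- ===== VERDICT (by name: the statement is the Claim_ definition above) =====
theorem is_reduced_row_echelon_spec : Claim_equal_is_reduced_row_echelon := by
  intro matrix _ hpre
  unfold Spec_is_reduced_row_echelon is_reduced_row_echelon is_reduced_row_echelon_alt
  exact pvLoop_eq matrix hpre matrix (fun _ h => h) (-1) false
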